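-- pv_equiv track=rewrite | github.com/qnl/qdit | qdit/utils/verification.py | verify_group_properties
-- ===== SOURCE A (Python) =====
-- def verify_group_properties(d, elements):
--     """
--     Verifies that the elements form a group under multiplication mod d
--     by checking closure and existence of inverses.
--
--     Args:
--         d (int): The modulus
--         elements (list): List of group elements
--
--     Returns:
--         bool: True if group properties are satisfied
--     """
--     # Check closure
--     for a in elements:
--         for b in elements:
--             product = (a * b) % d
--             if product not in elements:
--                 return False
--
--     # Check inverses
--     for a in elements:
--         has_inverse = False
--         for b in elements:
--             if (a * b) % d == 1:
--                 has_inverse = True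
--                 break
--         if not has_inverse:
--             return False
--
--     return True
-- ===== SOURCE B (Python) =====
-- def verify_group_properties(d, elements):
--     # Single fused sweep: check closure pair-by-pair and collect which
--     # elements acquire an inverse along the way; one membership pass at the end.
--     have_inverse = set()
--     for a in elements:
--         for b in elements:
--             p = (a * b) % d
--             if p not in elements:
--                 return False
--             if p == 1:
--                 have_inverse.add(a)
--     return all(a in have_inverse for a in elements)
-- ===== Notes on version B (the rewrite author's own statement) =====
-- stated objective: alternative
-- what changed: A's two separate double loops (closure sweep, then a fresh inverse search per element) are fused into one nested sweep that records a 'have_inverse' set as it checks closure, followed by a single membership pass; the dedicated inverse double loop disappears.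
-- outside the precondition, e.g. on verify_group_properties(0, [1]): A raises ZeroDivisionError, B raises ZeroDivisionError
import Mathlib
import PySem

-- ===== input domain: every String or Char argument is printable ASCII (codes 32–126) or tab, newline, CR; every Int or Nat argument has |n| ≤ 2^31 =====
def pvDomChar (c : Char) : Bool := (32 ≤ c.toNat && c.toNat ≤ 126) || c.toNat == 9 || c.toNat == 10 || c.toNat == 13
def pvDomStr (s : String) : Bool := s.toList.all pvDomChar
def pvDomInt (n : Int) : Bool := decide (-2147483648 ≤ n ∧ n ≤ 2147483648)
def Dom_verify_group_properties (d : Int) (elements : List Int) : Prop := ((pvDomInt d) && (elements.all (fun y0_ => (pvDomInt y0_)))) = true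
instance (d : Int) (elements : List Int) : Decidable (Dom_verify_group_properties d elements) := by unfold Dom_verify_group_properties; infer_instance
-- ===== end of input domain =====

-- B fuses A's two double loops into one sweep that records a have_inverse set while
-- checking closure; a single membership pass replaces A's second double loop (objective: alternative decomposition).

-- ===== PORT A =====
-- inner closure loop: 'for b in elements: if (a*b)%d not in elements: return False'
def aClosureInner (d a : Int) (elements : List Int) : List Int → Bool
  | [] => true
  | b :: rest =>
    if elements.contains (PySem.Int.mod (a * b) d) then aClosureInner d a elements rest
    else false

-- outer closure loop over a
def aClosureOuter (d : Int) (elements : List Int) : List Int → Bool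
  | [] => true
  | a :: rest =>
    if aClosureInner d a elements elements then aClosureOuter d elements rest else false

-- inner inverse search: 'for b in elements: if (a*b)%d == 1: has_inverse = True; break'
def aHasInverse (d a : Int) : List Int → Bool
  | [] => false
  | b :: rest => if PySem.Int.mod (a * b) d == 1 then true else aHasInverse d a rest

-- outer inverse loop: 'if not has_inverse: return False'
def aInverseOuter (d : Int) (elements : List Int) : List Int → Bool
  | [] => true
  | a :: rest =>
    if aHasInverse d a elements then aInverseOuter d elements rest else false

def verify_group_properties (d : Int) (elements : List Int) : Bool :=
  if aClosureOuter d elements elements then aInverseOuter d elements elements else false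

-- ===== PORT B =====
-- fused inner loop over b: early 'return False' modelled as none; carries the have_inverse set
def bInner (d a : Int) (elements : List Int) : List Int → PySem.Set Int → Option (PySem.Set Int)
  | [], s => some s
  | b :: rest, s =>
    let p := PySem.Int.mod (a * b) d
    if elements.contains p then
      bInner d a elements rest (if p == 1 then PySem.Set.add s a else s)
    else none

-- outer loop over a
def bOuter (d : Int) (elements : List Int) : List Int → PySem.Set Int → Option (PySem.Set Int)
  | [], s => some s
  | a :: rest, s =>
    match bInner d a elements elements s with
    | none => none
    | some s' => bOuter d elements rest s'

def verify_group_properties_alt (d : Int) (elements : List Int) : Bool :=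
  match bOuter d elements elements PySem.Set.empty with
  | none => false
  | some s => elements.all (fun a => PySem.Set.contains s a)

-- ===== PRECONDITION & SPEC =====
-- Pre_ excludes exactly the inputs where Python A raises ZeroDivisionError: d = 0 with nonempty elements.
def Pre_verify_group_properties (d : Int) (elements : List Int) : Prop := d ≠ 0 ∨ elements = []
instance (d : Int) (elements : List Int) : Decidable (Pre_verify_group_properties d elements) := by
  unfold Pre_verify_group_properties; infer_instance
def pvWitness_verify_group_properties : Int × List Int := (5, [1, 2, 3, 4])

def Spec_verify_group_properties (d : Int) (elements : List Int) (out : Bool) : Prop := out = verify_group_properties_alt d elements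
instance (d : Int) (elements : List Int) (out : Bool) : Decidable (Spec_verify_group_properties d elements out) := by unfold Spec_verify_group_properties; infer_instance

-- ===== CLAIM (what is proved, stated in full; the proofs are below) =====
def Claim_equal_verify_group_properties : Prop := ∀ (d : Int) (elements : List Int), Dom_verify_group_properties d elements → Pre_verify_group_properties d elements → Spec_verify_group_properties d elements (verify_group_properties d elements)

-- ===== LEMMAS AND PROOFS =====

theorem aClosureInner_eq_all (d a : Int) (elements bs : List Int) :
    aClosureInner d a elements bs
      = bs.all (fun b => elements.contains (PySem.Int.mod (a * b) d)) := by
  induction bs with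
  | nil => rfl
  | cons b rest ih =>
    simp only [aClosureInner, List.all_cons, ih]
    cases elements.contains (PySem.Int.mod (a * b) d) <;> simp

theorem aClosureOuter_eq_all (d : Int) (elements as : List Int) :
    aClosureOuter d elements as
      = as.all (fun a => elements.all (fun b => elements.contains (PySem.Int.mod (a * b) d))) := by
  induction as with
  | nil => rfl
  | cons a rest ih =>
    simp only [aClosureOuter, aClosureInner_eq_all, List.all_cons, ih]
    cases elements.all (fun b => elements.contains (PySem.Int.mod (a * b) d)) <;> simp

theorem aHasInverse_eq_any (d a : Int) (bs : List Int) :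
    aHasInverse d a bs = bs.any (fun b => PySem.Int.mod (a * b) d == 1) := by
  induction bs with
  | nil => rfl
  | cons b rest ih =>
    simp only [aHasInverse, List.any_cons, ih]
    cases PySem.Int.mod (a * b) d == 1 <;> simp

theorem aInverseOuter_eq_all (d : Int) (elements as : List Int) :
    aInverseOuter d elements as = as.all (fun a => aHasInverse d a elements) := by
  induction as with
  | nil => rfl
  | cons a rest ih =>
    simp only [aInverseOuter, List.all_cons, ih]
    cases aHasInverse d a elements <;> simp

theorem set_add_idem (s : PySem.Set Int) (a : Int) :
    PySem.Set.add (PySem.Set.add s a) a = PySem.Set.add s a := by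
  simp only [PySem.Set.add]
  split_ifs with h1 h2 <;> simp_all

theorem bInner_eq (d a : Int) (elements : List Int) (bs : List Int) (s : PySem.Set Int) :
    bInner d a elements bs s
      = if bs.all (fun b => elements.contains (PySem.Int.mod (a * b) d)) then
          some (if bs.any (fun b => PySem.Int.mod (a * b) d == 1) then PySem.Set.add s a else s)
        else none := by
  induction bs generalizing s with
  | nil => rfl
  | cons b rest ih =>
    simp only [bInner, ih, List.all_cons, List.any_cons]
    cases hc : elements.contains (PySem.Int.mod (a * b) d)
    · simp only [Bool.false_and, if_false, Bool.false_eq_true, reduceIte]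
    · by_cases h1 : (PySem.Int.mod (a * b) d == 1) = true
      · simp only [h1, Bool.true_and, Bool.true_or, if_true, reduceIte]
        cases rest.any (fun b => PySem.Int.mod (a * b) d == 1) <;>
          simp [set_add_idem]
      · simp only [Bool.not_eq_true] at h1
        simp only [h1, Bool.true_and, Bool.false_or, if_true, Bool.false_eq_true, reduceIte]

theorem bOuter_eq (d : Int) (elements : List Int) (as' : List Int) (s : PySem.Set Int) :
    bOuter d elements as' s
      = if as'.all (fun a => elements.all (fun b => elements.contains (PySem.Int.mod (a * b) d))) then
          some (as'.foldl (fun s a =>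
            if elements.any (fun b => PySem.Int.mod (a * b) d == 1) then PySem.Set.add s a else s) s)
        else none := by
  induction as' generalizing s with
  | nil => rfl
  | cons a rest ih =>
    simp only [bOuter, bInner_eq, List.all_cons, List.foldl_cons]
    cases hc : elements.all (fun b => elements.contains (PySem.Int.mod (a * b) d))
    · simp only [hc, Bool.false_and, Bool.false_eq_true, reduceIte]
    · simp only [hc, Bool.true_and, reduceIte, ih]

theorem mem_foldl_add (P : Int → Bool) (as' : List Int) (s : PySem.Set Int) (x : Int) :
    (x ∈ as'.foldl (fun s a => if P a then PySem.Set.add s a else s) s)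
      ↔ x ∈ s ∨ (x ∈ as' ∧ P x) := by
  induction as' generalizing s with
  | nil => simp
  | cons a rest ih =>
    simp only [List.foldl_cons, ih, List.mem_cons]
    by_cases h : P a
    · simp [h, PySem.Set.mem_add]
      constructor
      · rintro (((hs | rfl) | ⟨hr, hp⟩)) <;> tauto
      · rintro (hs | ⟨(rfl | hr), hp⟩) <;> tauto
    · simp [h]
      constructor
      · rintro (hs | ⟨hr, hp⟩) <;> tauto
      · rintro (hs | ⟨(rfl | hr), hp⟩) <;> simp_all

theorem contains_iff (s : PySem.Set Int) (x : Int) :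
    PySem.Set.contains s x = true ↔ x ∈ s := by
  simp [PySem.Set.contains]

-- ===== VERDICT (by name: the statement is the Claim_ definition above) =====
theorem verify_group_properties_spec : Claim_equal_verify_group_properties := by
  intro d elements _ _
  unfold Spec_verify_group_properties verify_group_properties verify_group_properties_alt
  rw [bOuter_eq, aClosureOuter_eq_all, aInverseOuter_eq_all]
  by_cases hc : (elements.all fun a =>
      elements.all fun b => elements.contains (PySem.Int.mod (a * b) d)) = true
  · simp only [hc, reduceIte]
    rw [Bool.eq_iff_iff]
    simp only [List.all_eq_true]
    constructor <;> intro h a ha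
    · rw [contains_iff, mem_foldl_add]
      have := h a ha
      rw [aHasInverse_eq_any] at this
      exact Or.inr ⟨ha, this⟩
    · have := (contains_iff _ _).mp (h a ha)
      rw [mem_foldl_add] at this
      rw [aHasInverse_eq_any]
      rcases this with h0 | ⟨_, hp⟩
      · simp [PySem.Set.empty] at h0
      · exact hp
  · simp only [Bool.not_eq_true] at hc
    simp only [hc, Bool.false_eq_true, reduceIte]
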